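-- pv_equiv track=rewrite | github.com/grnet/apimas | apimas/apimas/components/permissions.py | mk_collection_path
-- ===== SOURCE A (Python) =====
-- def mk_collection_path(loc):
--     endpoint_prefix = loc[0]
--
--     segments = []
--     collections = loc[1:]
--     for i, name in enumerate(reversed(collections)):
--         position, is_fields = divmod(i, 2)
--         if not is_fields:
--             segments.append(name)
--         else:
--             assert name == 'fields'
--     segments.append(endpoint_prefix)
--     return '/'.join(reversed(segments))
-- ===== SOURCE B (Python) =====
-- def _names(coll):
--     # collection names are the elements whose remaining-suffix length is odd;
--     # the elements in between must be the literal 'fields' markers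
--     if not coll:
--         return []
--     if len(coll) % 2 == 1:
--         return [coll[0]] + _names(coll[1:])
--     assert coll[0] == 'fields'
--     return _names(coll[1:])
--
--
-- def mk_collection_path(loc):
--     return '/'.join([loc[0]] + _names(loc[1:]))
-- ===== Notes on version B (the rewrite author's own statement) =====
-- stated objective: simpler
-- what changed: Replaces A's reversed enumerate/divmod-parity accumulator loop by a direct recursive descent over loc[1:] from the front that keeps an element exactly when the remaining suffix has odd length, then joins prefix and names in one step.
import Mathlib
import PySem

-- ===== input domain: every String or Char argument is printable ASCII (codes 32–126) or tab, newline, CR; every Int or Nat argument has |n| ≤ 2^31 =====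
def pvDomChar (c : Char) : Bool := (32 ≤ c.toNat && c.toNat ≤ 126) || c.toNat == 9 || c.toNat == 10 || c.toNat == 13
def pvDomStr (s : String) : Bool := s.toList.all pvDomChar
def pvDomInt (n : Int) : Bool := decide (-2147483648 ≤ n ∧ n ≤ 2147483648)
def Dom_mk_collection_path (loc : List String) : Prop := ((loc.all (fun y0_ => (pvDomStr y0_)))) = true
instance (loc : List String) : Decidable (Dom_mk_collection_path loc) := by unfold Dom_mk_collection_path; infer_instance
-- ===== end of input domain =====

-- B replaces A's reversed enumerate/divmod-parity loop by a direct recursive descent from the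
-- front, keeping an element as a name exactly when the remaining suffix has odd length (simpler).


-- ===== PORT A =====
def mk_collection_path (loc : List String) : String :=
  let endpoint_prefix := (PySem.List.pyGet? loc 0).getD ""   -- loc[0]; the none case (IndexError) is excluded by Pre_
  let collections := PySem.List.slice loc (some 1) none
  let segments :=
    (PySem.List.enumerate collections.reverse 0).foldl
      (fun segments p =>
        -- divmod(i, 2): the quotient 'position' is never used; 'is_fields' is the remainder.
        -- the else-branch is Python's 'assert name == "fields"': it appends nothing; where it
        -- raises (AssertionError) is excluded by Pre_
        if PySem.Int.mod p.1 2 == 0 then segments ++ [p.2] else segments)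
      ([] : List String)
  let segments := segments ++ [endpoint_prefix]
  PySem.Str.join "/" segments.reverse

-- ===== PORT B =====
-- port of Source B's _names: keep the head iff the current list has odd length; even-length heads
-- are the 'fields' markers (Source B's assert raises there iff the head ≠ "fields"; excluded by Pre_)
def pvNamesB : List String → List String
  | [] => []
  | x :: r =>
    if PySem.Int.mod ((r.length : Int) + 1) 2 == 1 then x :: pvNamesB r else pvNamesB r

def mk_collection_path_alt (loc : List String) : String :=
  PySem.Str.join "/" (((PySem.List.pyGet? loc 0).getD "") :: pvNamesB (PySem.List.slice loc (some 1) none))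

-- ===== PRECONDITION & SPEC =====
-- Pre_ excludes exactly the inputs where Python A raises: the empty list (IndexError on loc[0])
-- and lists whose odd-from-the-end positions of loc[1:] are not all 'fields' (AssertionError);
-- B raises on exactly the same inputs.
def Pre_mk_collection_path (loc : List String) : Prop :=
  loc ≠ [] ∧ ∀ k : Nat, (h : k < loc.tail.length) →
    (loc.tail.length - 1 - k) % 2 = 1 → loc.tail[k] = "fields"
instance (loc : List String) : Decidable (Pre_mk_collection_path loc) := by
  unfold Pre_mk_collection_path; infer_instance
def pvWitness_mk_collection_path : List String := ["api", "users", "fields", "posts"]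

def Spec_mk_collection_path (loc : List String) (out : String) : Prop := out = mk_collection_path_alt loc
instance (loc : List String) (out : String) : Decidable (Spec_mk_collection_path loc out) := by unfold Spec_mk_collection_path; infer_instance

-- ===== CLAIM (what is proved, stated in full; the proofs are below) =====
def Claim_equal_mk_collection_path : Prop := ∀ (loc : List String), Dom_mk_collection_path loc → Pre_mk_collection_path loc → Spec_mk_collection_path loc (mk_collection_path loc)

-- ===== LEMMAS AND PROOFS =====

-- elements at even / odd indices (proof-side characterisation of both programs)
mutual
def pvEvens {α : Type} : List α → List α
  | [] => []
  | x :: r => x :: pvOdds r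
def pvOdds {α : Type} : List α → List α
  | [] => []
  | _ :: r => pvEvens r
end

theorem pvEvensOdds_append_singleton {α : Type} (zs : List α) (y : α) :
    pvEvens (zs ++ [y]) = pvEvens zs ++ (if zs.length % 2 = 0 then [y] else []) ∧
    pvOdds (zs ++ [y]) = pvOdds zs ++ (if zs.length % 2 = 1 then [y] else []) := by
  induction zs with
  | nil => simp [pvEvens, pvOdds]
  | cons z zs ih =>
    constructor
    · simp only [List.cons_append, pvEvens, ih.2, List.length_cons]
      rcases Nat.even_or_odd zs.length with h | h <;>
        simp [Nat.even_iff.mp, Nat.odd_iff.mp, *]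
    · simp only [List.cons_append, pvOdds, ih.1, List.length_cons]
      rcases Nat.even_or_odd zs.length with h | h <;>
        simp [Nat.even_iff.mp, Nat.odd_iff.mp, *]

theorem pvEvensOdds_reverse {α : Type} (ys : List α) :
    (pvEvens ys).reverse = (if ys.length % 2 = 1 then pvEvens ys.reverse else pvOdds ys.reverse) ∧
    (pvOdds ys).reverse = (if ys.length % 2 = 1 then pvOdds ys.reverse else pvEvens ys.reverse) := by
  induction ys with
  | nil => simp [pvEvens, pvOdds]
  | cons y ys ih =>
    have h1 := (pvEvensOdds_append_singleton ys.reverse y).1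
    have h2 := (pvEvensOdds_append_singleton ys.reverse y).2
    constructor
    · simp only [pvEvens, List.reverse_cons, List.length_cons, ih.2, h1, h2]
      rcases Nat.even_or_odd ys.length with h | h <;>
        simp_all [Nat.even_iff.mp, Nat.odd_iff.mp]
    · simp only [pvOdds, List.reverse_cons, List.length_cons, ih.1, h1, h2]
      rcases Nat.even_or_odd ys.length with h | h <;>
        simp_all [Nat.even_iff.mp, Nat.odd_iff.mp]

-- B's recursion computes the even- or odd-index elements, by the parity of the length
theorem pvNamesB_eq (xs : List String) :
    pvNamesB xs = (if xs.length % 2 = 1 then pvEvens xs else pvOdds xs) := by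
  induction xs with
  | nil => simp [pvNamesB, pvOdds]
  | cons x r ih =>
    simp only [pvNamesB, ih, List.length_cons, pvEvens, pvOdds]
    have : PySem.Int.mod ((r.length : Int) + 1) 2 = (((r.length + 1) % 2 : Nat) : Int) := by
      exact_mod_cast PySem.Int.mod_natCast (r.length + 1) 2
    rcases Nat.even_or_odd r.length with h | h <;>
      simp_all [Nat.even_iff.mp, Nat.odd_iff.mp]

-- A's filtered enumeration keeps the even- or odd-index elements, by the parity of the start
theorem pvEnumFilter (xs : List String) (s : Int) :
    ((PySem.List.enumerate xs s).filter (fun p => PySem.Int.mod p.1 2 == 0)).map (·.2)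
      = (if PySem.Int.mod s 2 = 0 then pvEvens xs else pvOdds xs) := by
  induction xs generalizing s with
  | nil => simp [PySem.List.enumerate_nil, pvEvens, pvOdds]
  | cons x r ih =>
    have hs : PySem.Int.mod s 2 = s % 2 := PySem.Int.mod_eq_emod_of_pos (by omega)
    have hs1 : PySem.Int.mod (s + 1) 2 = (s + 1) % 2 := PySem.Int.mod_eq_emod_of_pos (by omega)
    rw [PySem.List.enumerate_cons]
    by_cases h : s % 2 = 0
    · have h1 : (s + 1) % 2 = 1 := by omega
      rw [List.filter_cons_of_pos (by simp [h]), List.map_cons, ih (s + 1), hs1, h1, hs, h]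
      simp [pvEvens]
    · have h0 : s % 2 = 1 := by omega
      have h1 : (s + 1) % 2 = 0 := by omega
      rw [List.filter_cons_of_neg (by simp [h0]), ih (s + 1), hs1, h1, hs, h0]
      simp [pvOdds]

-- ===== VERDICT (by name: the statement is the Claim_ definition above) =====
theorem mk_collection_path_spec : Claim_equal_mk_collection_path := by
  intro loc _ _
  unfold Spec_mk_collection_path mk_collection_path mk_collection_path_alt
  simp only [PySem.List.foldl_append_if (p := fun p : Int × String => PySem.Int.mod p.1 2 == 0)
      (f := fun p : Int × String => p.2), List.nil_append]
  rw [pvEnumFilter]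
  congr 1
  rw [pvNamesB_eq]
  have h := (pvEvensOdds_reverse (PySem.List.slice loc (some 1) none).reverse).1
  simp only [List.length_reverse, List.reverse_reverse] at h
  simp only [List.reverse_append, List.reverse_cons, List.reverse_nil, List.nil_append,
    List.singleton_append]
  rw [if_pos (show PySem.Int.mod 0 2 = 0 from rfl), h]
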